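-- pv_equiv track=rewrite | github.com/AlexanderIon/regular_expression | help_metods.py | create_list_doubles
-- ===== SOURCE A (Python) =====
-- def create_list_doubles(_list_finder):
--     _list_finder.sort()
--     doubles = []
--     for i, element in enumerate(_list_finder):
--         if i != 0:
--             if element == old:
--                 doubles.append(element)
--                 old = None
--                 continue
--         old = element
--
--     return doubles
-- ===== SOURCE B (Python) =====
-- def create_list_doubles(_list_finder):
--     _list_finder.sort()
--     counts = {}
--     for v in _list_finder:
--         counts[v] = counts.get(v, 0) + 1
--     doubles = []
--     for v, c in counts.items():
--         doubles.extend([v] * (c // 2))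
--     return doubles
-- ===== Notes on version B (the rewrite author's own statement) =====
-- stated objective: simpler
-- what changed: Replaces the adjacent-comparison scan with its None sentinel by a frequency table built in one pass over the sorted list, emitting each value count//2 times; dict insertion order on a sorted list keeps the output order identical.
import Mathlib
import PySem

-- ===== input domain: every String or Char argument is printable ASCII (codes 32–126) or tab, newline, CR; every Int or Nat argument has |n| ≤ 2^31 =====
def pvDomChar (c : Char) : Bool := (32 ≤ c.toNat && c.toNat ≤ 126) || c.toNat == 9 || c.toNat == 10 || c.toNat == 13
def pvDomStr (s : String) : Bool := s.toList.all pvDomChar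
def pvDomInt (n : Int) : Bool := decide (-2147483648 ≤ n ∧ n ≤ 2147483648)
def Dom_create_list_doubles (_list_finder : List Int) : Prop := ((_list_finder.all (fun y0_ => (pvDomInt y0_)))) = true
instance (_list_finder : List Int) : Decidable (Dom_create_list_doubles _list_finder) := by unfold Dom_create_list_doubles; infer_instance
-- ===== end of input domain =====

-- B replaces A's adjacent-comparison scan (with its None sentinel) by a frequency dict over the
-- sorted list, emitting each value count // 2 times; same O(n log n) cost, simpler control flow.
-- Both A and B sort the argument list in place (Python side effect); the equivalence proved here
-- is about the RETURN value.

-- ===== PORT A =====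
def create_list_doubles (_list_finder : List Int) : List Int :=
  ((PySem.List.enumerate (PySem.List.sorted _list_finder (fun x => x)) 0).foldl
    (fun (st : List Int × Option Int) p =>
      if p.1 ≠ 0 ∧ st.2 = some p.2 then (st.1 ++ [p.2], none) else (st.1, some p.2))
    ([], none)).1

-- ===== PORT B =====
def create_list_doubles_alt (_list_finder : List Int) : List Int :=
  (((PySem.List.sorted _list_finder (fun x => x)).foldl
      (fun (d : PySem.Dict Int Int) v => d.insert v (d.getD v 0 + 1))
      PySem.Dict.empty).items).foldl
    (fun acc p => acc ++ PySem.List.pyRepeat [p.1] (PySem.Int.floordiv p.2 2)) []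

-- ===== PRECONDITION & SPEC =====
def Spec_create_list_doubles (_list_finder : List Int) (out : List Int) : Prop := out = create_list_doubles_alt _list_finder
instance (_list_finder : List Int) (out : List Int) : Decidable (Spec_create_list_doubles _list_finder out) := by unfold Spec_create_list_doubles; infer_instance

-- ===== CLAIM (what is proved, stated in full; the proofs are below) =====
def Claim_equal_create_list_doubles : Prop := ∀ (_list_finder : List Int), Dom_create_list_doubles _list_finder → Spec_create_list_doubles _list_finder (create_list_doubles _list_finder)

-- ===== LEMMAS AND PROOFS =====

-- A's loop, with the index test and the None sentinel resolved away.
def gLoop : Option Int → List Int → List Int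
  | _, [] => []
  | old, x :: t => if old = some x then x :: gLoop none t else gLoop (some x) t

-- B's result, with the counter dict resolved into count over the sorted list.
def bExpr (s : List Int) : List Int :=
  (PySem.Set.ofList s).flatMap (fun k => List.replicate (s.count k / 2) k)

lemma foldA_enum (t : List Int) : ∀ (n : Int), 1 ≤ n → ∀ (db : List Int) (old : Option Int),
    ((PySem.List.enumerate t n).foldl
      (fun (st : List Int × Option Int) p =>
        if p.1 ≠ 0 ∧ st.2 = some p.2 then (st.1 ++ [p.2], none) else (st.1, some p.2))
      (db, old)).1 = db ++ gLoop old t := by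
  induction t with
  | nil => intro n _ db old; simp [PySem.List.enumerate_nil, gLoop]
  | cons x t ih =>
    intro n hn db old
    rw [PySem.List.enumerate_cons]
    simp only [List.foldl_cons]
    by_cases h : old = some x
    · have hne : (n : Int) ≠ 0 := by omega
      rw [if_pos ⟨hne, h⟩, ih (n + 1) (by omega) (db ++ [x]) none]
      simp [gLoop, h, List.append_assoc]
    · rw [if_neg (by tauto), ih (n + 1) (by omega) db (some x)]
      simp [gLoop, h]

lemma portA_eq_gLoop (l : List Int) :
    create_list_doubles l = gLoop none (PySem.List.sorted l (fun x => x)) := by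
  unfold create_list_doubles
  cases hs : PySem.List.sorted l (fun x => x) with
  | nil => simp [PySem.List.enumerate_nil, gLoop]
  | cons x t =>
    rw [PySem.List.enumerate_cons]
    simp only [List.foldl_cons]
    rw [if_neg (by simp)]
    have h01 : (0 : Int) + 1 = 1 := by norm_num
    rw [h01, foldA_enum t 1 (by omega) [] (some x)]
    simp [gLoop]

lemma portB_eq_bExpr (l : List Int) :
    create_list_doubles_alt l = bExpr (PySem.List.sorted l (fun x => x)) := by
  unfold create_list_doubles_alt bExpr
  rw [PySem.Dict.foldl_insert_getD_add_one_eq_counter, PySem.Dict.items_counter,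
    PySem.List.foldl_append_eq_flatMap, List.nil_append, List.flatMap_map]
  refine List.flatMap_congr (fun k _ => ?_)
  rw [PySem.List.pyRepeat_singleton]
  have h2 : (2 : Int) = ((2 : Nat) : Int) := by norm_num
  rw [h2, PySem.Int.floordiv_natCast, Int.toNat_natCast]

-- a fresh old-value that does not match the head can be forgotten
lemma gLoop_switch (x : Int) (r : List Int) (h : r.head? ≠ some x) :
    gLoop (some x) r = gLoop none r := by
  cases r with
  | nil => rfl
  | cons y t =>
    have hy : y ≠ x := by
      simpa only [List.head?_cons, ne_eq, Option.some.injEq] using h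
    have hyx : (some x : Option Int) ≠ some y := by simpa using Ne.symm hy
    simp [gLoop, hyx]

lemma gLoop_run (x : Int) (r : List Int) (hr : ∀ y ∈ r, y ≠ x) : ∀ (m : Nat),
    gLoop none (List.replicate m x ++ r) = List.replicate (m / 2) x ++ gLoop none r := by
  have hhead : r.head? ≠ some x := by
    cases r with
    | nil => simp
    | cons y t =>
      simp only [List.head?_cons, ne_eq, Option.some.injEq]
      exact hr y (by simp)
  intro m
  induction m using Nat.twoStepInduction with
  | zero => simp
  | one =>
    have h1 : gLoop none (List.replicate 1 x ++ r) = gLoop (some x) r := by simp [gLoop]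
    rw [h1, gLoop_switch x r hhead]
    simp
  | more m ih _ =>
    have h1 : gLoop none (List.replicate (m + 2) x ++ r)
        = x :: gLoop none (List.replicate m x ++ r) := by
      simp [List.replicate_succ, gLoop]
    rw [h1, ih]
    have h2 : (m + 2) / 2 = m / 2 + 1 := by omega
    rw [h2, List.replicate_succ, List.cons_append]

lemma foldl_add_cons (r : List Int) : ∀ (s : List Int) (x : Int), x ∉ r →
    r.foldl PySem.Set.add (x :: s) = x :: r.foldl PySem.Set.add s := by
  induction r with
  | nil => intro s x _; rfl
  | cons y t ih =>
    intro s x hx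
    have hyx : y ≠ x := fun he => hx (by simp [he])
    have hadd : PySem.Set.add (x :: s) y = x :: PySem.Set.add s y := by
      simp only [PySem.Set.add, PySem.Set.contains, List.contains_cons]
      have hb : (y == x) = false := by simp [hyx]
      rw [hb]
      simp only [Bool.false_or]
      split_ifs <;> simp
    simp only [List.foldl_cons, hadd]
    exact ih _ x (fun hm => hx (by simp [hm]))

lemma ofList_replicate_succ (x : Int) : ∀ (m : Nat),
    (List.replicate (m + 1) x).foldl PySem.Set.add [] = [x] := by
  have h3 : PySem.Set.add ([] : PySem.Set Int) x = [x] := rfl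
  have h4 : PySem.Set.add ([x] : PySem.Set Int) x = [x] := by
    simp [PySem.Set.add, PySem.Set.contains]
  have key : ∀ (m : Nat), (List.replicate m x).foldl PySem.Set.add [x] = [x] := by
    intro m
    induction m with
    | zero => rfl
    | succ m ih => rw [List.replicate_succ, List.foldl_cons, h4]; exact ih
  intro m
  rw [List.replicate_succ, List.foldl_cons, h3]
  exact key m

lemma ofList_run (x : Int) (r : List Int) (hx : x ∉ r) (m : Nat) :
    PySem.Set.ofList (List.replicate (m + 1) x ++ r) = x :: PySem.Set.ofList r := by
  rw [PySem.Set.ofList_eq_foldl, List.foldl_append, ofList_replicate_succ x m,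
    foldl_add_cons r [] x hx, ← PySem.Set.ofList_eq_foldl]

lemma bExpr_run (x : Int) (r : List Int) (hx : ∀ y ∈ r, y ≠ x) (m : Nat) :
    bExpr (List.replicate (m + 1) x ++ r)
      = List.replicate ((m + 1) / 2) x ++ bExpr r := by
  have hxr : x ∉ r := fun hm => (hx x hm) rfl
  unfold bExpr
  rw [ofList_run x r hxr m, List.flatMap_cons]
  have hcx : (List.replicate (m + 1) x ++ r).count x = m + 1 := by
    simp [List.count_append, List.count_eq_zero_of_not_mem hxr]
  rw [hcx]
  congr 1
  refine List.flatMap_congr (fun k hk => ?_)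
  have hkr : k ∈ r := (PySem.Set.mem_ofList r k).mp hk
  have hkx : k ≠ x := hx k hkr
  have hck : (List.replicate (m + 1) x ++ r).count k = r.count k := by
    simp [List.count_append, List.count_replicate, Ne.symm hkx]
  rw [hck]

lemma main_sorted : ∀ (n : Nat) (s : List Int), s.length = n → s.Pairwise (· ≤ ·) →
    gLoop none s = bExpr s := by
  intro n
  induction n using Nat.strong_induction_on with
  | _ n ih =>
    intro s hlen hs
    cases s with
    | nil => simp [gLoop, bExpr, PySem.Set.ofList]
    | cons x t =>
      set t₁ := t.takeWhile (fun y => y == x) with ht1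
      set r := t.dropWhile (fun y => y == x) with hr
      have hsplit : t = t₁ ++ r := (List.takeWhile_append_dropWhile).symm
      have ht1rep : t₁ = List.replicate t₁.length x := by
        apply List.eq_replicate_of_mem
        intro b hb
        simpa using List.mem_takeWhile_imp hb
      have hxle : ∀ y ∈ t, x ≤ y := (List.pairwise_cons.mp hs).1
      have hrt : ∀ y ∈ r, y ∈ t := fun y hy => by
        rw [hsplit]; exact List.mem_append_right _ hy
      have hrpw : r.Pairwise (· ≤ ·) := by
        have ht : t.Pairwise (· ≤ ·) := (List.pairwise_cons.mp hs).2
        exact ((hsplit ▸ ht).sublist (List.sublist_append_right t₁ r))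
      have hrne : ∀ y ∈ r, y ≠ x := by
        cases hre : r with
        | nil => simp
        | cons h r' =>
          have hhne : h ≠ x := by
            have hd := List.head?_dropWhile_not (fun y => y == x) t
            rw [← hr, hre] at hd
            simpa using hd
          have hxh : x < h :=
            lt_of_le_of_ne (hxle h (hrt h (by rw [hre]; simp))) (Ne.symm hhne)
          intro y hy
          rcases List.mem_cons.mp hy with hy1 | hy2
          · rw [hy1]; exact hhne
          · have hle : h ≤ y := by
              rw [hre] at hrpw
              exact (List.pairwise_cons.mp hrpw).1 y hy2
            omega
      have hdecomp : x :: t = List.replicate (t₁.length + 1) x ++ r := by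
        rw [List.replicate_succ, List.cons_append]
        congr 1
        rw [hsplit, ← ht1rep]
      rw [hdecomp, gLoop_run x r hrne (t₁.length + 1), bExpr_run x r hrne t₁.length]
      congr 1
      have hlt : r.length < n := by
        have hsub : r.Sublist t := hsplit ▸ List.sublist_append_right t₁ r
        have := hsub.length_le
        simp at hlen
        omega
      exact ih r.length hlt r rfl hrpw

-- ===== VERDICT (by name: the statement is the Claim_ definition above) =====
theorem create_list_doubles_spec : Claim_equal_create_list_doubles := by
  intro l _
  unfold Spec_create_list_doubles
  rw [portA_eq_gLoop, portB_eq_bExpr]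
  exact main_sorted _ _ rfl (PySem.List.sorted_pairwise l (fun x => x))
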